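-- pv_equiv track=rewrite | github.com/aceofall/protoc-gen-doc | script/filter.py | getSyntaxLineRange
-- ===== SOURCE A (Python) =====
-- def getCloseBraceLine(linenum, syntax_lines):
--     endnum = linenum
--     if syntax_lines[endnum].find('}') != -1:
--         return endnum
--
--     endnum += 1
--     while True:
--         if syntax_lines[endnum].find('{') != -1: # 하위 block
--             endnum = getCloseBraceLine(endnum, syntax_lines) + 1
--             continue
--         if syntax_lines[endnum].find('}') != -1:
--             break
--         endnum += 1
--     return endnum
--
-- def getSyntaxLineRange(linenum, syntax_lines):
--     startnum = linenum
--     while True: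
--         if startnum <= 0:
--             break
--         tmpline = syntax_lines[startnum - 1].strip()
--         if len(tmpline) == 0:
--             break
--         if tmpline[-1] == '\\' or tmpline[-1] == ',':
--             startnum -= 1
--         else:
--             break
--
--     endnum = linenum
--     while True:
--         if endnum >= len(syntax_lines):
--             break
--         tmpline = syntax_lines[endnum].strip()
--         if tmpline[-1] == '{':
--             endnum = getCloseBraceLine(endnum, syntax_lines)
--         if tmpline[-1] == '\\' or tmpline[-1] == ',':
--             endnum += 1
--         else:
--             break
--     return startnum, endnum
-- ===== SOURCE B (Python) =====
-- def _find_close(linenum, syntax_lines):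
--     if '}' in syntax_lines[linenum]:
--         return linenum
--     bal = 0
--     j = linenum
--     while True:
--         j += 1
--         line = syntax_lines[j]
--         has_open = '{' in line
--         has_close = '}' in line
--         if has_close and not has_open:
--             if bal == 0:
--                 return j
--             bal -= 1
--         elif has_open and not has_close:
--             bal += 1
--
-- def getSyntaxLineRange(linenum, syntax_lines):
--     startnum = linenum
--     if linenum > 0:
--         for prev in reversed(syntax_lines[:linenum]):
--             p = prev.strip()
--             if p and (p[-1] == '\\' or p[-1] == ','):
--                 startnum -= 1
--             else:
--                 break
--
--     endnum = linenum
--     while endnum < len(syntax_lines):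
--         last = syntax_lines[endnum].strip()[-1]
--         if last == '{':
--             return startnum, _find_close(endnum, syntax_lines)
--         if last != '\\' and last != ',':
--             return startnum, endnum
--         endnum += 1
--     return startnum, endnum
-- ===== Notes on version B (the rewrite author's own statement) =====
-- stated objective: alternative
-- what changed: getCloseBraceLine's self-recursion into nested blocks is replaced by a single iterative forward walk with a balance counter, the backward start walk becomes a fold over the reversed prefix slice, and the end walk returns its pair directly at the '{' and plain-line cases instead of falling through.
import Mathlib
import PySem

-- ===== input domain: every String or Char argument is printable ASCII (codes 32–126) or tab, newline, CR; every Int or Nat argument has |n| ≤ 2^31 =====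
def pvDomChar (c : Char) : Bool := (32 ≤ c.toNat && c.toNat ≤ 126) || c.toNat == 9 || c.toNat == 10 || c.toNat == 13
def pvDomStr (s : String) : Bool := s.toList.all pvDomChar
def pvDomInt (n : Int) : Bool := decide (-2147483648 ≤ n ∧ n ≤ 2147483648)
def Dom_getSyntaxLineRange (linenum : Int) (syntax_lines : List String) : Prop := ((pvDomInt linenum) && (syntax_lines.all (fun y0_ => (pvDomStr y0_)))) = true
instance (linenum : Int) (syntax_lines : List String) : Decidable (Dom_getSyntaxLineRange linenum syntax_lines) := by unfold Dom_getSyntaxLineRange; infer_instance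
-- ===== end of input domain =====

-- B replaces A's self-recursive close-brace search by a single iterative walk with a balance
-- counter, the backward start walk by a fold over the reversed prefix slice, and the end walk
-- by early returns (objective: alternative, same cost); return values agree on Pre_.

-- ===== PORT A =====
-- first while-loop of getSyntaxLineRange (walks startnum back); fuel only for termination
-- (startnum strictly decreases towards 0, so linenum.toNat+1 is always enough; none = IndexError)
def pvStartA (lines : List String) : Nat → Int → Option Int
  | 0, _ => none
  | f+1, startnum =>
    if startnum ≤ 0 then some startnum
    else
      match PySem.List.pyGet? lines (startnum - 1) with
      | none => none  -- IndexError
      | some l =>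
        let tmpline := PySem.Str.strip l
        if PySem.Str.len tmpline = 0 then some startnum
        else
          match PySem.Str.pyGet? tmpline (-1) with
          | none => none
          | some c =>
            if c = '\\' ∨ c = ',' then pvStartA lines f (startnum - 1) else some startnum

-- getCloseBraceLine: pvCloseA is the function entry, pvCloseAWhile its 'while True' loop
-- (the recursive call 'getCloseBraceLine(endnum, ...)' is pvCloseA again); fuel for termination
mutual
def pvCloseA (lines : List String) : Nat → Int → Option Int
  | 0, _ => none
  | f+1, linenum =>
    match PySem.List.pyGet? lines linenum with
    | none => none  -- IndexError
    | some l =>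
      if PySem.Str.find l "}" ≠ -1 then some linenum
      else pvCloseAWhile lines f (linenum + 1)
def pvCloseAWhile (lines : List String) : Nat → Int → Option Int
  | 0, _ => none
  | f+1, endnum =>
    match PySem.List.pyGet? lines endnum with
    | none => none  -- IndexError
    | some l =>
      if PySem.Str.find l "{" ≠ -1 then
        match pvCloseA lines f endnum with
        | none => none
        | some e => pvCloseAWhile lines f (e + 1)
      else if PySem.Str.find l "}" ≠ -1 then some endnum
      else pvCloseAWhile lines f (endnum + 1)
end

-- second while-loop of getSyntaxLineRange
def pvEndA (lines : List String) : Nat → Int → Option Int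
  | 0, _ => none
  | f+1, endnum =>
    if endnum ≥ (lines.length : Int) then some endnum
    else
      match PySem.List.pyGet? lines endnum with
      | none => none  -- IndexError
      | some l =>
        let tmpline := PySem.Str.strip l
        match PySem.Str.pyGet? tmpline (-1) with
        | none => none  -- IndexError: tmpline[-1] on an empty stripped line
        | some c =>
          match (if c = '{' then pvCloseA lines (2 * lines.length + 2) endnum else some endnum) with
          | none => none
          | some e2 =>
            if c = '\\' ∨ c = ',' then pvEndA lines f (e2 + 1) else some e2

def getSyntaxLineRange (linenum : Int) (syntax_lines : List String) : Int × Int :=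
  match pvStartA syntax_lines (linenum.toNat + 1) linenum with
  | none => (0, 0)  -- IndexError, outside Pre_
  | some s =>
    match pvEndA syntax_lines (((syntax_lines.length : Int) - linenum).toNat + 1) linenum with
    | none => (0, 0)  -- IndexError, outside Pre_
    | some e => (s, e)

-- ===== PORT B =====
-- the 'for prev in reversed(syntax_lines[:linenum])' loop: structural recursion on that list
def pvStartBWalk : List String → Int → Int
  | [], startnum => startnum
  | prev :: rest, startnum =>
    let p := PySem.Str.strip prev
    if PySem.Str.len p ≠ 0 ∧
        (PySem.Str.pyGet? p (-1) = some '\\' ∨ PySem.Str.pyGet? p (-1) = some ',') then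
      pvStartBWalk rest (startnum - 1)
    else startnum

-- _find_close's 'while True' loop: j is the value before 'j += 1', bal the balance counter
def pvCloseBLoop (lines : List String) : Nat → Int → Int → Option Int
  | 0, _, _ => none
  | f+1, j, bal =>
    match PySem.List.pyGet? lines (j + 1) with
    | none => none  -- IndexError
    | some line =>
      let hasOpen := PySem.Str.isIn "{" line
      let hasClose := PySem.Str.isIn "}" line
      if hasClose && !hasOpen then
        if bal = 0 then some (j + 1) else pvCloseBLoop lines f (j + 1) (bal - 1)
      else if hasOpen && !hasClose then pvCloseBLoop lines f (j + 1) (bal + 1)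
      else pvCloseBLoop lines f (j + 1) bal

def pvCloseB (lines : List String) (linenum : Int) : Option Int :=
  match PySem.List.pyGet? lines linenum with
  | none => none  -- IndexError
  | some l =>
    if PySem.Str.isIn "}" l then some linenum
    else pvCloseBLoop lines (lines.length + 1) linenum 0

-- B's end loop, carrying startnum so the '{' and plain cases return the pair directly
def pvEndB (lines : List String) : Nat → Int → Int → Option (Int × Int)
  | 0, _, _ => none
  | f+1, startnum, endnum =>
    if endnum < (lines.length : Int) then
      match PySem.List.pyGet? lines endnum with
      | none => none  -- IndexError
      | some l =>
        match PySem.Str.pyGet? (PySem.Str.strip l) (-1) with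
        | none => none  -- IndexError on an empty stripped line
        | some last =>
          if last = '{' then (pvCloseB lines endnum).map (fun j => (startnum, j))
          else if last ≠ '\\' ∧ last ≠ ',' then some (startnum, endnum)
          else pvEndB lines f startnum (endnum + 1)
    else some (startnum, endnum)

def getSyntaxLineRange_alt (linenum : Int) (syntax_lines : List String) : Int × Int :=
  let startnum :=
    if linenum > 0 then
      pvStartBWalk (PySem.List.slice syntax_lines none (some linenum)).reverse linenum
    else linenum
  (pvEndB syntax_lines (((syntax_lines.length : Int) - linenum).toNat + 1) startnum linenum).getD (0, 0)

-- ===== PRECONDITION & SPEC =====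
-- vocabulary for Pre_ (input-level only; reaches neither port)
def pvLine (lines : List String) (i : Int) : String := PySem.List.pyGetD lines i ""
-- per-line brace balance: +1 open-only, -1 close-only, 0 otherwise
def pvTok (l : String) : Int :=
  if PySem.Str.isIn "}" l then (if PySem.Str.isIn "{" l then 0 else -1)
  else (if PySem.Str.isIn "{" l then 1 else 0)
def pvSumTok (lines : List String) (j : Int) : Nat → Int
  | 0 => 0
  | k+1 => pvSumTok lines j k + pvTok (pvLine lines (j + k))
-- a continuation line: stripped, it ends with '\' or ','
def pvIsCont (l : String) : Bool :=
  (PySem.Str.pyGet? (PySem.Str.strip l) (-1) == some '\\') ||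
  (PySem.Str.pyGet? (PySem.Str.strip l) (-1) == some ',')
-- the block opened at line e has a closing line in range
def pvCloseOK (lines : List String) (e : Int) : Bool :=
  PySem.Str.isIn "}" (pvLine lines e) ||
  decide (∃ k2 < lines.length, e + 1 + (k2 : Int) < (lines.length : Int) ∧
    pvSumTok lines (e + 1) (k2 + 1) = -1)

-- Pre_ = exactly the inputs on which the Python A returns (no IndexError): linenum within
-- Python's (negative-wrapping) index range or equal to len; walking forward from linenum,
-- the run of continuation lines ends at the list's end or at a line that strips nonempty,
-- and if that stop line ends with '{' its block has a matching close line before the end.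
def Pre_getSyntaxLineRange (linenum : Int) (syntax_lines : List String) : Prop :=
  -(syntax_lines.length : Int) ≤ linenum ∧ linenum ≤ (syntax_lines.length : Int) ∧
  ∃ k ≤ ((syntax_lines.length : Int) - linenum).toNat,
    (∀ i < k, pvIsCont (pvLine syntax_lines (linenum + i)) = true) ∧
    (linenum + (k : Int) = (syntax_lines.length : Int) ∨
      (PySem.Str.pyGet? (PySem.Str.strip (pvLine syntax_lines (linenum + k))) (-1) ≠ none ∧
       pvIsCont (pvLine syntax_lines (linenum + k)) = false ∧
       (PySem.Str.pyGet? (PySem.Str.strip (pvLine syntax_lines (linenum + k))) (-1) = some '{' →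
         pvCloseOK syntax_lines (linenum + (k : Int)) = true)))

instance (linenum : Int) (syntax_lines : List String) : Decidable (Pre_getSyntaxLineRange linenum syntax_lines) := by
  unfold Pre_getSyntaxLineRange; infer_instance

def pvWitness_getSyntaxLineRange : Int × List String := (0, ["a"])

def Spec_getSyntaxLineRange (linenum : Int) (syntax_lines : List String) (out : Int × Int) : Prop := out = getSyntaxLineRange_alt linenum syntax_lines
instance (linenum : Int) (syntax_lines : List String) (out : Int × Int) : Decidable (Spec_getSyntaxLineRange linenum syntax_lines out) := by unfold Spec_getSyntaxLineRange; infer_instance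

-- ===== CLAIM (what is proved, stated in full; the proofs are below) =====
def Claim_equal_getSyntaxLineRange : Prop := ∀ (linenum : Int) (syntax_lines : List String), Dom_getSyntaxLineRange linenum syntax_lines → Pre_getSyntaxLineRange linenum syntax_lines → Spec_getSyntaxLineRange linenum syntax_lines (getSyntaxLineRange linenum syntax_lines)

-- ===== LEMMAS AND PROOFS =====

theorem pv_witness_ok : Dom_getSyntaxLineRange pvWitness_getSyntaxLineRange.1 pvWitness_getSyntaxLineRange.2 ∧ Pre_getSyntaxLineRange pvWitness_getSyntaxLineRange.1 pvWitness_getSyntaxLineRange.2 := by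
  decide

-- 's.find(sub) != -1' and 'sub in s' test the same thing
theorem pv_find_ne_iff_isIn (l sub : String) : (PySem.Str.find l sub ≠ -1) ↔ PySem.Str.isIn sub l = true := by
  rw [PySem.Str.find_ne_neg_one_iff, PySem.Str.isIn_iff_infix]

theorem pv_line_some (lines : List String) (j : Int) (h : PySem.Raise.InRange lines.length j) :
    PySem.List.pyGet? lines j = some (pvLine lines j) := by
  unfold pvLine PySem.List.pyGetD
  cases hg : PySem.List.pyGet? lines j with
  | none => exact absurd ((PySem.List.pyGet?_eq_none_iff lines j).mp hg) (not_not_intro h)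
  | some x => rfl

theorem pv_tok_bounds (l : String) : -1 ≤ pvTok l ∧ pvTok l ≤ 1 := by
  unfold pvTok; split_ifs <;> omega

-- evaluates pvTok once the two membership tests are known
theorem pv_tok_eval (l : String) {b1 b2 : Bool} (hc : PySem.Str.isIn "}" l = b1)
    (ho : PySem.Str.isIn "{" l = b2) :
    pvTok l = if b1 then (if b2 then 0 else -1) else (if b2 then 1 else 0) := by
  unfold pvTok; rw [hc, ho]


theorem pv_sumTok_succ_front (lines : List String) (j : Int) (k : Nat) :
    pvSumTok lines j (k+1) = pvTok (pvLine lines j) + pvSumTok lines (j+1) k := by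
  induction k with
  | zero => simp [pvSumTok]
  | succ k ih =>
    have h1 : pvSumTok lines j (k+1+1) = pvSumTok lines j (k+1) + pvTok (pvLine lines (j + (k+1))) := rfl
    rw [h1, ih]
    have h2 : pvSumTok lines (j+1) (k+1) = pvSumTok lines (j+1) k + pvTok (pvLine lines (j+1 + k)) := rfl
    rw [h2]
    have he : j + ((k:Int)+1) = j + 1 + k := by ring
    push_cast [he]
    ring

theorem pv_sumTok_split (lines : List String) (j : Int) (a b : Nat) :
    pvSumTok lines j (a+b) = pvSumTok lines j a + pvSumTok lines (j + a) b := by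
  induction b with
  | zero => simp [pvSumTok]
  | succ b ih =>
    have h1 : pvSumTok lines j (a+(b+1)) = pvSumTok lines j (a+b) + pvTok (pvLine lines (j + (a+b:Nat))) := rfl
    have h2 : pvSumTok lines (j+a) (b+1) = pvSumTok lines (j+a) b + pvTok (pvLine lines (j + a + b)) := rfl
    rw [h1, h2, ih]
    push_cast
    ring_nf

theorem pv_hit_of_le_neg_two (lines : List String) (j : Int) : ∀ (K : Nat),
    pvSumTok lines j K ≤ -2 → ∃ m < K, pvSumTok lines j (m+1) = -1 := by
  intro K
  induction K with
  | zero => intro h; simp [pvSumTok] at h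
  | succ K ih =>
    intro h
    by_cases hK : pvSumTok lines j K ≤ -2
    · obtain ⟨m, hm, hs⟩ := ih hK
      exact ⟨m, by omega, hs⟩
    · have hstep : pvSumTok lines j (K+1) = pvSumTok lines j K + pvTok (pvLine lines (j + K)) := rfl
      have hb := pv_tok_bounds (pvLine lines (j + K))
      have hKv : pvSumTok lines j K = -1 := by omega
      cases K with
      | zero => simp [pvSumTok] at hKv
      | succ K' => exact ⟨K', by omega, hKv⟩

-- one unfolding step of each of A's close-brace functions
theorem pv_closeA_step (lines : List String) (f : Nat) (j : Int) (l : String)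
    (h : PySem.List.pyGet? lines j = some l) :
    pvCloseA lines (f+1) j =
      (if PySem.Str.find l "}" ≠ -1 then some j else pvCloseAWhile lines f (j+1)) := by
  simp only [pvCloseA, h]

theorem pv_closeAWhile_step (lines : List String) (f : Nat) (j : Int) (l : String)
    (h : PySem.List.pyGet? lines j = some l) :
    pvCloseAWhile lines (f+1) j =
      (if PySem.Str.find l "{" ≠ -1 then
        (match pvCloseA lines f j with
         | none => none
         | some e => pvCloseAWhile lines f (e + 1))
      else if PySem.Str.find l "}" ≠ -1 then some j
      else pvCloseAWhile lines f (j + 1)) := by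
  simp only [pvCloseAWhile, h]

-- A's close-brace while-loop returns the first j' ≥ j with token sum -1
theorem pv_closeAWhile_eq (lines : List String) : ∀ (k0 : Nat) (j : Int) (f : Nat),
    -(lines.length : Int) ≤ j → j + (k0 : Int) < (lines.length : Int) →
    pvSumTok lines j (k0+1) = -1 → (∀ k' < k0, pvSumTok lines j (k'+1) ≠ -1) →
    2*k0+2 ≤ f → pvCloseAWhile lines f j = some (j + k0) := by
  intro k0
  induction k0 using Nat.strong_induction_on with
  | _ k0 IH =>
  intro j f h1 h2 hsum hmin hf
  cases f with
  | zero => exact absurd hf (by omega)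
  | succ f =>
  have hr : PySem.Raise.InRange lines.length j := ⟨h1, by omega⟩
  have hfront := pv_sumTok_succ_front lines j k0
  have hs1 : pvSumTok lines j 1 = pvTok (pvLine lines j) := by simp [pvSumTok]
  have htb := pv_tok_bounds (pvLine lines j)
  rw [pv_closeAWhile_step lines f j _ (pv_line_some lines j hr)]
  simp only [pv_find_ne_iff_isIn]
  have hminshift : ∀ k' < k0 - 1, k0 ≠ 0 → pvSumTok lines (j+1) (k'+1) ≠ -1 - pvTok (pvLine lines j) := by
    intro k' hk' hk0 hcon
    have hsh := pv_sumTok_succ_front lines j (k'+1)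
    refine hmin (k'+1) (by omega) ?_
    rw [hsh, hcon]; ring
  rcases hC : PySem.Str.isIn "}" (pvLine lines j) <;>
    rcases hO : PySem.Str.isIn "{" (pvLine lines j) <;>
    have htok := pv_tok_eval (pvLine lines j) hC hO <;> simp at htok <;>
    simp only [Bool.false_eq_true, ↓reduceIte]
  · -- no brace: tok 0, step to j+1
    have hk0 : k0 ≠ 0 := by
      intro h0; rw [h0] at hsum; rw [hs1, htok] at hsum; omega
    obtain ⟨k0', rfl⟩ : ∃ k0', k0 = k0' + 1 := ⟨k0 - 1, by omega⟩
    have := IH k0' (by omega) (j+1) f (by omega) (by push_cast at h2 ⊢; omega)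
      (by rw [hfront, htok] at hsum; omega)
      (by intro k' hk'; have := hminshift k' (by omega) hk0; rw [htok] at this; simpa using this)
      (by omega)
    rw [this]
    congr 1
    push_cast
    ring
  · -- open only: tok 1, descend into the sub-block then continue
    cases f with
    | zero => exact absurd hf (by omega)
    | succ f' =>
    -- the recursive getCloseBraceLine call at j: line j has '{' but no '}'
    rw [pv_closeA_step lines f' j _ (pv_line_some lines j hr)]
    simp only [pv_find_ne_iff_isIn, hC, Bool.false_eq_true, ↓reduceIte]
    -- the sum from j+1 reaches -2, so it first reaches -1 at some minimal k1
    have hsum2 : pvSumTok lines (j+1) k0 = -2 := by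
      rw [hfront, htok] at hsum; omega
    have hhit : ∃ m, pvSumTok lines (j+1) (m+1) = -1 := by
      obtain ⟨m, hm, hv⟩ := pv_hit_of_le_neg_two lines (j+1) k0 (by omega)
      exact ⟨m, hv⟩
    have hk1spec := Nat.find_spec hhit
    set k1 := Nat.find hhit with hk1def
    have hk1min : ∀ m' < k1, pvSumTok lines (j+1) (m'+1) ≠ -1 := fun m' h => Nat.find_min hhit h
    have hk1lt : k1 + 1 < k0 := by
      obtain ⟨m, hm, hv⟩ := pv_hit_of_le_neg_two lines (j+1) k0 (by omega)
      have hle : k1 ≤ m := Nat.find_min' hhit hv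
      rcases Nat.lt_or_ge (k1+1) k0 with h | h
      · exact h
      · have : k1 + 1 = k0 := by omega
        rw [← this] at hsum2
        rw [hsum2] at hk1spec
        omega
    have hinner := IH k1 (by omega) (j+1) f' (by omega)
      (by omega) hk1spec hk1min (by omega)
    rw [hinner]
    -- continue scanning after the sub-block, from j + k1 + 2
    have hsplit := pv_sumTok_split lines (j+1) (k1+1) (k0 - k1 - 1)
    have hj2 : j + 1 + ((k1:Nat) + 1 : Nat) = j + 1 + (k1:Int) + 1 := by push_cast; ring
    rw [show (k1+1) + (k0 - k1 - 1) = k0 by omega] at hsplit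
    have hsum3 : pvSumTok lines (j + 1 + (k1:Int) + 1) ((k0 - k1 - 2) + 1) = -1 := by
      rw [hsplit, hk1spec] at hsum2
      rw [show (k0 - k1 - 2) + 1 = k0 - k1 - 1 by omega, ← hj2]
      omega
    have hmin3 : ∀ k' < k0 - k1 - 2, pvSumTok lines (j + 1 + (k1:Int) + 1) (k'+1) ≠ -1 := by
      intro k' hk' hcon
      have hsp2 := pv_sumTok_split lines (j+1) (k1+1) (k'+1)
      rw [hj2, hcon, hk1spec] at hsp2
      refine hmin (k1+k'+2) (by omega) ?_
      have hsh := pv_sumTok_succ_front lines j (k1+k'+2)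
      rw [show (k1+1)+(k'+1) = k1+k'+2 by omega] at hsp2
      rw [hsh, htok, hsp2]
      ring
    have houter := IH (k0 - k1 - 2) (by omega) (j + 1 + (k1:Int) + 1) (f'+1)
      (by omega) (by omega)
      hsum3 hmin3 (by omega)
    show pvCloseAWhile lines (f'+1) (j + 1 + (k1:Int) + 1) = some (j + (k0:Int))
    rw [houter]
    congr 1
    omega
  · -- close only: tok -1, this is the line
    have hk0 : k0 = 0 := by
      by_contra h0
      exact hmin 0 (by omega) (by rw [hs1, htok])
    rw [hk0]
    simp
  · -- both braces: the recursive call returns j itself, continue at j+1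
    cases f with
    | zero => exact absurd hf (by omega)
    | succ f' =>
    rw [pv_closeA_step lines f' j _ (pv_line_some lines j hr)]
    simp only [pv_find_ne_iff_isIn, hC, ↓reduceIte]
    have hk0 : k0 ≠ 0 := by
      intro h0; rw [h0] at hsum; rw [hs1, htok] at hsum; omega
    obtain ⟨k0', rfl⟩ : ∃ k0', k0 = k0' + 1 := ⟨k0 - 1, by omega⟩
    have := IH k0' (by omega) (j+1) (f'+1) (by omega) (by push_cast at h2 ⊢; omega)
      (by rw [hfront, htok] at hsum; omega)
      (by intro k' hk'; have := hminshift k' (by omega) hk0; rw [htok] at this; simpa using this)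
      (by omega)
    rw [this]
    congr 1
    push_cast
    ring

-- one unfolding step of B's loop
theorem pv_closeBLoop_step (lines : List String) (f : Nat) (j bal : Int) (line : String)
    (h : PySem.List.pyGet? lines (j+1) = some line) :
    pvCloseBLoop lines (f+1) j bal =
      (if PySem.Str.isIn "}" line && !PySem.Str.isIn "{" line then
        (if bal = 0 then some (j + 1) else pvCloseBLoop lines f (j + 1) (bal - 1))
      else if PySem.Str.isIn "{" line && !PySem.Str.isIn "}" line then
        pvCloseBLoop lines f (j + 1) (bal + 1)
      else pvCloseBLoop lines f (j + 1) bal) := by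
  simp only [pvCloseBLoop, h]

-- B's balance-counter loop returns the first j' > j with token sum -(bal+1)
theorem pv_closeBLoop_eq (lines : List String) : ∀ (k0 : Nat) (j bal : Int) (f : Nat),
    -(lines.length : Int) ≤ j + 1 → j + 1 + (k0 : Int) < (lines.length : Int) →
    0 ≤ bal →
    pvSumTok lines (j+1) (k0+1) = -(bal+1) → (∀ k' < k0, pvSumTok lines (j+1) (k'+1) ≠ -(bal+1)) →
    k0 < f → pvCloseBLoop lines f j bal = some (j + 1 + k0) := by
  intro k0
  induction k0 with
  | zero =>
    intro j bal f h1 h2 hb hsum _ hf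
    cases f with
    | zero => exact absurd hf (by omega)
    | succ f =>
      have hr : PySem.Raise.InRange lines.length (j+1) := ⟨h1, by push_cast at h2 ⊢; omega⟩
      have hs1 : pvSumTok lines (j+1) 1 = pvTok (pvLine lines (j+1)) := by simp [pvSumTok]
      have htok : pvTok (pvLine lines (j+1)) = -(bal+1) := by rw [← hs1]; exact hsum
      have htb := pv_tok_bounds (pvLine lines (j+1))
      have hbal0 : bal = 0 := by omega
      rw [pv_closeBLoop_step lines f j bal _ (pv_line_some lines (j+1) hr)]
      rcases hC : PySem.Str.isIn "}" (pvLine lines (j+1)) <;>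
        rcases hO : PySem.Str.isIn "{" (pvLine lines (j+1)) <;>
        have := pv_tok_eval (pvLine lines (j+1)) hC hO <;>
        simp [this] at htok <;> try omega
      · rw [hbal0]; simp
  | succ k0 IH =>
    intro j bal f h1 h2 hb hsum hmin hf
    cases f with
    | zero => exact absurd hf (by omega)
    | succ f =>
      have hr : PySem.Raise.InRange lines.length (j+1) := ⟨h1, by push_cast at h2 ⊢; omega⟩
      have hfront := pv_sumTok_succ_front lines (j+1) (k0+1)
      have hs1 : pvSumTok lines (j+1) 1 = pvTok (pvLine lines (j+1)) := by simp [pvSumTok]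
      have hne1 : pvTok (pvLine lines (j+1)) ≠ -(bal+1) := by
        rw [← hs1]; exact hmin 0 (by omega)
      have htb := pv_tok_bounds (pvLine lines (j+1))
      have hminshift : ∀ k' < k0, pvSumTok lines (j+1+1) (k'+1) ≠ -(bal+1) - pvTok (pvLine lines (j+1)) := by
        intro k' hk' hcon
        have hsh := pv_sumTok_succ_front lines (j+1) (k'+1)
        refine hmin (k'+1) (by omega) ?_
        rw [hsh, hcon]; ring
      have hsum2 : pvSumTok lines (j+1+1) (k0+1) = -(bal+1) - pvTok (pvLine lines (j+1)) := by
        rw [hfront] at hsum; omega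
      have hgoal : j + 1 + ((k0:Nat)+1:Nat) = j + 1 + 1 + k0 := by push_cast; ring
      rw [pv_closeBLoop_step lines f j bal _ (pv_line_some lines (j+1) hr), hgoal]
      have hb2 : j + 1 + 1 + (k0 : Int) < (lines.length : Int) := by push_cast at h2 ⊢; omega
      rcases hC : PySem.Str.isIn "}" (pvLine lines (j+1)) <;>
        rcases hO : PySem.Str.isIn "{" (pvLine lines (j+1)) <;>
        simp only [Bool.and_true, Bool.and_false, Bool.not_true, Bool.not_false,
          Bool.and_self, Bool.false_eq_true, ↓reduceIte] <;>
        have htok := pv_tok_eval (pvLine lines (j+1)) hC hO <;> simp at htok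
      · -- no brace: tok 0
        exact IH (j+1) bal f (by omega) hb2 hb (by rw [hsum2, htok]; ring)
          (by intro k' hk'; have := hminshift k' hk'; rw [htok] at this; simpa using this) (by omega)
      · -- open only: tok 1
        exact IH (j+1) (bal+1) f (by omega) hb2 (by omega) (by rw [hsum2, htok]; ring)
          (by intro k' hk' hcon; exact hminshift k' hk' (by rw [hcon, htok]; ring)) (by omega)
      · -- close only: tok -1, bal ≠ 0
        have hbne : ¬ bal = 0 := by intro h0; rw [h0, htok] at hne1; omega
        rw [if_neg hbne]
        exact IH (j+1) (bal-1) f (by omega) hb2 (by omega) (by rw [hsum2, htok]; ring)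
          (by intro k' hk' hcon; exact hminshift k' hk' (by rw [hcon, htok]; ring)) (by omega)
      · -- both braces: tok 0
        exact IH (j+1) bal f (by omega) hb2 hb (by rw [hsum2, htok]; ring)
          (by intro k' hk'; have := hminshift k' hk'; rw [htok] at this; simpa using this) (by omega)

-- both close-brace searches agree where the block is matched
theorem pv_close_both (lines : List String) (e : Int)
    (h1 : -(lines.length : Int) ≤ e) (h2 : e < (lines.length : Int))
    (hok : pvCloseOK lines e = true) :
    ∃ E, pvCloseA lines (2 * lines.length + 2) e = some E ∧ pvCloseB lines e = some E := by
  have hr : PySem.Raise.InRange lines.length e := ⟨h1, h2⟩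
  rw [show 2 * lines.length + 2 = (2 * lines.length + 1) + 1 by omega]
  rw [pv_closeA_step lines (2 * lines.length + 1) e _ (pv_line_some lines e hr)]
  simp only [pv_find_ne_iff_isIn]
  unfold pvCloseB
  rw [pv_line_some lines e hr]
  rcases hC : PySem.Str.isIn "}" (pvLine lines e) with _ | _
  · -- no '}' in the line itself: both scan forward from e+1
    simp only [Bool.false_eq_true, ↓reduceIte]
    unfold pvCloseOK at hok
    rw [hC] at hok
    simp only [Bool.false_or, decide_eq_true_eq] at hok
    obtain ⟨k2, hk2len, hk2lt, hk2sum⟩ := hok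
    have hhit : ∃ m, pvSumTok lines (e+1) (m+1) = -1 := ⟨k2, hk2sum⟩
    have hk0spec := Nat.find_spec hhit
    set k0 := Nat.find hhit with hk0def
    have hk0min : ∀ m' < k0, pvSumTok lines (e+1) (m'+1) ≠ -1 := fun m' h => Nat.find_min hhit h
    have hk0le : k0 ≤ k2 := Nat.find_min' hhit hk2sum
    have hbound : e + 1 + (k0 : Int) < (lines.length : Int) := by
      have : (k0 : Int) ≤ (k2 : Int) := by exact_mod_cast hk0le
      omega
    have hA := pv_closeAWhile_eq lines k0 (e+1) (2 * lines.length + 1)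
      (by omega) hbound hk0spec hk0min (by omega)
    have hB := pv_closeBLoop_eq lines k0 e 0 (lines.length + 1)
      (by omega) hbound (by omega) (by simpa using hk0spec)
      (by intro k' hk'; simpa using hk0min k' hk') (by omega)
    rw [if_neg (by rw [hC]; exact Bool.false_ne_true)]
    exact ⟨e + 1 + k0, hA, hB⟩
  · -- '}' in the line: both return e itself
    simp only [↓reduceIte]
    rw [if_pos hC]
    exact ⟨e, rfl, rfl⟩

-- A's backward start walk = B's fold over the reversed prefix
theorem pv_start_walk (lines : List String) : ∀ (sn : Nat), sn ≤ lines.length → ∀ f, sn < f →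
    pvStartA lines f (sn : Int) = some (pvStartBWalk ((lines.take sn).reverse) (sn : Int)) := by
  intro sn
  induction sn with
  | zero =>
    intro _ f hf
    cases f with
    | zero => exact absurd hf (by omega)
    | succ f => simp [pvStartA, pvStartBWalk]
  | succ sn IH =>
    intro hlen f hf
    cases f with
    | zero => exact absurd hf (by omega)
    | succ f =>
    have hsn : sn < lines.length := by omega
    have hidx : ((sn+1 : Nat) : Int) - 1 = (sn : Int) := by push_cast; ring
    have hsome : PySem.List.pyGet? lines ((sn : Nat) : Int) = some lines[sn] := by
      rw [PySem.List.pyGet?_natCast]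
      exact List.getElem?_eq_getElem hsn
    have htake : (lines.take (sn+1)).reverse = lines[sn] :: (lines.take sn).reverse := by
      rw [List.take_add_one, List.getElem?_eq_getElem hsn]
      simp
    have hstep : pvStartA lines (f+1) ((sn+1 : Nat) : Int) =
        (if PySem.Str.len (PySem.Str.strip lines[sn]) = 0 then some ((sn+1 : Nat) : Int)
         else
           match PySem.Str.pyGet? (PySem.Str.strip lines[sn]) (-1) with
           | none => none
           | some c =>
             if c = '\\' ∨ c = ',' then pvStartA lines f ((sn : Nat) : Int)
             else some ((sn+1 : Nat) : Int)) := by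
      simp only [pvStartA, hidx, hsome]
      rw [if_neg (by push_cast; omega)]
    have hwalk : pvStartBWalk (lines[sn] :: (lines.take sn).reverse) ((sn+1 : Nat) : Int) =
        (if PySem.Str.len (PySem.Str.strip lines[sn]) ≠ 0 ∧
            (PySem.Str.pyGet? (PySem.Str.strip lines[sn]) (-1) = some '\\' ∨
             PySem.Str.pyGet? (PySem.Str.strip lines[sn]) (-1) = some ',') then
          pvStartBWalk ((lines.take sn).reverse) (((sn+1 : Nat) : Int) - 1)
        else ((sn+1 : Nat) : Int)) := by
      simp only [pvStartBWalk]
    rw [hstep, htake, hwalk, hidx]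
    by_cases hlen0 : PySem.Str.len (PySem.Str.strip lines[sn]) = 0
    · rw [if_pos hlen0, if_neg (by intro hcon; exact hcon.1 hlen0)]
    · rw [if_neg hlen0]
      cases hg : PySem.Str.pyGet? (PySem.Str.strip lines[sn]) (-1) with
      | none =>
        exfalso
        apply hlen0
        rw [PySem.Str.len_eq]
        have hnil : (PySem.Str.strip lines[sn]).toList = [] := by
          have hg' : PySem.List.pyGet? (PySem.Str.strip lines[sn]).toList (-1) = none := by
            simpa using hg
          rw [PySem.List.pyGet?_neg_one] at hg'
          rwa [← List.getLast?_eq_none_iff]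
        rw [hnil]
        simp
      | some c =>
        show (if c = '\\' ∨ c = ',' then pvStartA lines f ((sn : Nat) : Int)
              else some ((sn+1 : Nat) : Int)) = _
        by_cases hc : c = '\\' ∨ c = ','
        · rw [if_pos hc,
            if_pos ⟨hlen0, by rcases hc with h | h <;> [left; right] <;> rw [h]⟩]
          exact IH (by omega) f (by omega)
        · have hnc : ¬ (PySem.Str.len (PySem.Str.strip lines[sn]) ≠ 0 ∧
              (some c = some '\\' ∨ some c = some ',')) := by
            rintro ⟨-, h | h⟩ <;> injection h with h'
            · exact hc (Or.inl h')
            · exact hc (Or.inr h')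
          rw [if_neg hc, if_neg hnc]

-- one unfolding step of each end walk
theorem pv_endA_step (lines : List String) (f : Nat) (j : Int) (l : String)
    (hlt : ¬ j ≥ (lines.length : Int)) (h : PySem.List.pyGet? lines j = some l) :
    pvEndA lines (f+1) j =
      (match PySem.Str.pyGet? (PySem.Str.strip l) (-1) with
       | none => none
       | some c =>
         match (if c = '{' then pvCloseA lines (2 * lines.length + 2) j else some j) with
         | none => none
         | some e2 => if c = '\\' ∨ c = ',' then pvEndA lines f (e2+1) else some e2) := by
  simp only [pvEndA, h]
  rw [if_neg hlt]

theorem pv_endB_step (lines : List String) (f : Nat) (s j : Int) (l : String)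
    (hlt : j < (lines.length : Int)) (h : PySem.List.pyGet? lines j = some l) :
    pvEndB lines (f+1) s j =
      (match PySem.Str.pyGet? (PySem.Str.strip l) (-1) with
       | none => none
       | some last =>
         if last = '{' then (pvCloseB lines j).map (fun t => (s, t))
         else if last ≠ '\\' ∧ last ≠ ',' then some (s, j)
         else pvEndB lines f s (j+1)) := by
  simp only [pvEndB, h]
  rw [if_pos hlt]

-- a line indexed out of range reads as the empty string
theorem pv_line_out (lines : List String) (i : Int)
    (h : ¬ PySem.Raise.InRange lines.length i) : pvLine lines i = "" := by
  unfold pvLine PySem.List.pyGetD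
  rw [(PySem.List.pyGet?_eq_none_iff lines i).mpr h]
  rfl

-- the two end walks agree along the continuation run
theorem pv_end_both (lines : List String) : ∀ (k : Nat) (j s : Int) (fA fB : Nat),
    -(lines.length : Int) ≤ j → j + (k : Int) ≤ (lines.length : Int) →
    (∀ i < k, pvIsCont (pvLine lines (j + i)) = true) →
    (j + (k : Int) = (lines.length : Int) ∨
      (PySem.Str.pyGet? (PySem.Str.strip (pvLine lines (j + k))) (-1) ≠ none ∧
       pvIsCont (pvLine lines (j + k)) = false ∧
       (PySem.Str.pyGet? (PySem.Str.strip (pvLine lines (j + k))) (-1) = some '{' →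
         pvCloseOK lines (j + (k : Int)) = true))) →
    k < fA → k < fB →
    ∃ E, pvEndA lines fA j = some E ∧ pvEndB lines fB s j = some (s, E) := by
  intro k
  induction k with
  | zero =>
    intro j s fA fB h1 h2 _ hstop hfA hfB
    cases fA with
    | zero => exact absurd hfA (by omega)
    | succ fA =>
    cases fB with
    | zero => exact absurd hfB (by omega)
    | succ fB =>
    rw [show j + ((0:Nat) : Int) = j by simp] at h2 hstop
    rcases hstop with hEnd | ⟨hne, hnc, hbr⟩
    · -- the walk stopped at the end of the list
      refine ⟨j, ?_, ?_⟩
      · simp only [pvEndA]; rw [if_pos (by omega)]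
      · simp only [pvEndB]; rw [if_neg (by omega)]
    · -- the walk stopped on a real line
      have hjlt : j < (lines.length : Int) := by
        rcases lt_or_eq_of_le h2 with h | h
        · exact h
        · exfalso
          rw [pv_line_out lines j (by rw [h]; intro ⟨_, hlt⟩; omega)] at hne
          exact hne (by decide)
      have hr : PySem.Raise.InRange lines.length j := ⟨h1, hjlt⟩
      rw [pv_endA_step lines fA j _ (by omega) (pv_line_some lines j hr),
          pv_endB_step lines fB s j _ hjlt (pv_line_some lines j hr)]
      cases hg : PySem.Str.pyGet? (PySem.Str.strip (pvLine lines j)) (-1) with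
      | none => exact absurd hg hne
      | some c =>
      unfold pvIsCont at hnc
      rw [hg] at hnc
      simp only [Bool.or_eq_false_iff, beq_eq_false_iff_ne, ne_eq, Option.some.injEq] at hnc
      by_cases hbrace : c = '{'
      · obtain ⟨E, hA, hB⟩ := pv_close_both lines j h1 hjlt (hbr (hbrace ▸ hg))
        refine ⟨E, ?_, ?_⟩
        · show (match (if c = '{' then _ else _ : Option Int) with
               | none => none
               | some e2 => if c = '\\' ∨ c = ',' then pvEndA lines fA (e2+1) else some e2) = some E
          rw [if_pos hbrace, hA]
          show (if c = '\\' ∨ c = ',' then pvEndA lines fA (E+1) else some E) = some E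
          rw [if_neg (by rw [hbrace]; decide)]
        · show (if c = '{' then (pvCloseB lines j).map _ else _) = some (s, E)
          rw [if_pos hbrace, hB]
          rfl
      · refine ⟨j, ?_, ?_⟩
        · show (match (if c = '{' then _ else some j : Option Int) with
               | none => none
               | some e2 => if c = '\\' ∨ c = ',' then pvEndA lines fA (e2+1) else some e2) = some j
          rw [if_neg hbrace]
          show (if c = '\\' ∨ c = ',' then pvEndA lines fA (j+1) else some j) = some j
          rw [if_neg (by rintro (h | h); exacts [hnc.1 h, hnc.2 h])]
        · show (if c = '{' then _ else if c ≠ '\\' ∧ c ≠ ',' then some (s, j) else _) = some (s, j)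
          rw [if_neg hbrace, if_pos ⟨hnc.1, hnc.2⟩]
  | succ k IH =>
    intro j s fA fB h1 h2 hcnt hstop hfA hfB
    cases fA with
    | zero => exact absurd hfA (by omega)
    | succ fA =>
    cases fB with
    | zero => exact absurd hfB (by omega)
    | succ fB =>
    have hjlt : j < (lines.length : Int) := by push_cast at h2; omega
    have hr : PySem.Raise.InRange lines.length j := ⟨h1, hjlt⟩
    have hcont := hcnt 0 (by omega)
    rw [show j + ((0:Nat) : Int) = j by simp] at hcont
    unfold pvIsCont at hcont
    cases hg : PySem.Str.pyGet? (PySem.Str.strip (pvLine lines j)) (-1) with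
    | none => rw [hg] at hcont; simp at hcont
    | some c =>
    rw [hg] at hcont
    simp only [Bool.or_eq_true, beq_iff_eq, Option.some.injEq] at hcont
    have hbrace : ¬ c = '{' := by rcases hcont with rfl | rfl <;> decide
    have hidx : j + ((k+1 : Nat) : Int) = j + 1 + (k : Int) := by push_cast; ring
    rw [hidx] at h2 hstop
    obtain ⟨E, hA', hB'⟩ := IH (j+1) s fA fB (by omega) h2
      (by intro i hi
          have := hcnt (i+1) (by omega)
          rwa [show j + ((i+1 : Nat) : Int) = j + 1 + (i : Int) by push_cast; ring] at this)
      hstop (by omega) (by omega)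
    refine ⟨E, ?_, ?_⟩
    · rw [pv_endA_step lines fA j _ (by omega) (pv_line_some lines j hr), hg]
      show (match (if c = '{' then _ else some j : Option Int) with
            | none => none
            | some e2 => if c = '\\' ∨ c = ',' then pvEndA lines fA (e2+1) else some e2) = some E
      rw [if_neg hbrace]
      show (if c = '\\' ∨ c = ',' then pvEndA lines fA (j+1) else some j) = some E
      rw [if_pos hcont]
      exact hA'
    · rw [pv_endB_step lines fB s j _ hjlt (pv_line_some lines j hr), hg]
      show (if c = '{' then _ else if c ≠ '\\' ∧ c ≠ ',' then some (s, j) else pvEndB lines fB s (j+1)) = some (s, E)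
      rw [if_neg hbrace, if_neg (by rintro ⟨hc1, hc2⟩; rcases hcont with rfl | rfl; exacts [hc1 rfl, hc2 rfl])]
      exact hB'

-- ===== VERDICT (by name: the statement is the Claim_ definition above) =====
theorem getSyntaxLineRange_spec : Claim_equal_getSyntaxLineRange := by
  intro linenum lines _ hpre
  obtain ⟨hlo, hhi, k, hk, hcnt, hstop⟩ := hpre
  unfold Spec_getSyntaxLineRange
  set S := (if linenum > 0 then
      pvStartBWalk (PySem.List.slice lines none (some linenum)).reverse linenum
    else linenum) with hS
  have hstart : pvStartA lines (linenum.toNat + 1) linenum = some S := by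
    by_cases h0 : linenum > 0
    · have hln : linenum = ((linenum.toNat : Nat) : Int) := (Int.toNat_of_nonneg (by omega)).symm
      rw [hS, if_pos h0, PySem.List.slice_to lines (by omega : (0:Int) ≤ linenum)]
      have hw := pv_start_walk lines linenum.toNat (by omega) (linenum.toNat + 1) (by omega)
      rw [← hln] at hw
      exact hw
    · rw [hS, if_neg h0]
      rw [show linenum.toNat = 0 by omega]
      simp only [pvStartA]
      rw [if_pos (by omega)]
  obtain ⟨E, hA, hB⟩ := pv_end_both lines k linenum S
    (((lines.length : Int) - linenum).toNat + 1) (((lines.length : Int) - linenum).toNat + 1)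
    hlo (by omega) hcnt hstop (by omega) (by omega)
  simp only [getSyntaxLineRange, getSyntaxLineRange_alt, hstart, hA]
  rw [← hS, hB]
  rfl
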